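-- pv_equiv track=rewrite | github.com/paiml/depyler | examples/hard_crypto_hash.py | bit_manipulation_suite
-- ===== SOURCE A (Python) =====
-- from typing import Dict, List, Optional, Tuple
--
-- def bit_manipulation_suite(value: int) -> Tuple[int, int, int, int]:
--     """Popcount, bit reversal, byte swap, and right rotate on 32-bit int."""
--     v: int = value & 0xFFFFFFFF
--     pop: int = 0
--     tmp: int = v
--     while tmp > 0:
--         tmp = tmp & (tmp - 1)
--         pop += 1
--     rev: int = 0
--     tmp2: int = v
--     for i in range(32):
--         rev = (rev << 1) | (tmp2 & 1)
--         tmp2 = tmp2 >> 1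
--     rev = rev & 0xFFFFFFFF
--     b0: int = (v >> 24) & 0xFF
--     b1: int = (v >> 16) & 0xFF
--     b2: int = (v >> 8) & 0xFF
--     b3: int = v & 0xFF
--     swapped: int = (b3 << 24) | (b2 << 16) | (b1 << 8) | b0
--     rotated: int = ((v >> 7) | (v << 25)) & 0xFFFFFFFF
--     return (pop, rev, swapped, rotated)
-- ===== SOURCE B (Python) =====
-- POP4 = [0, 1, 1, 2, 1, 2, 2, 3, 1, 2, 2, 3, 2, 3, 3, 4]
-- REV4 = [0, 8, 4, 12, 2, 10, 6, 14, 1, 9, 5, 13, 3, 11, 7, 15]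
--
--
-- def bit_manipulation_suite(value):
--     """Popcount, bit reversal, byte swap, and right rotate on 32-bit int."""
--     v = value & 0xFFFFFFFF
--     pop = 0
--     rev = 0
--     tmp = v
--     for _ in range(8):
--         nib = tmp & 0xF
--         pop += POP4[nib]
--         rev = (rev << 4) | REV4[nib]
--         tmp = tmp >> 4
--     b0 = (v >> 24) & 0xFF
--     b1 = (v >> 16) & 0xFF
--     b2 = (v >> 8) & 0xFF
--     b3 = v & 0xFF
--     swapped = (b3 << 24) | (b2 << 16) | (b1 << 8) | b0
--     rotated = ((v >> 7) | (v << 25)) & 0xFFFFFFFF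
--     return (pop, rev, swapped, rotated)
-- ===== Notes on version B (the rewrite author's own statement) =====
-- stated objective: alternative
-- what changed: Replaced A's Kernighan clear-lowest-set-bit popcount loop and its separate per-bit reversal loop by a single table-driven pass over the nibbles of the word, using precomputed per-nibble popcount and bit-reversal lookup tables; byteswap and rotate are unchanged.
import Mathlib
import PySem

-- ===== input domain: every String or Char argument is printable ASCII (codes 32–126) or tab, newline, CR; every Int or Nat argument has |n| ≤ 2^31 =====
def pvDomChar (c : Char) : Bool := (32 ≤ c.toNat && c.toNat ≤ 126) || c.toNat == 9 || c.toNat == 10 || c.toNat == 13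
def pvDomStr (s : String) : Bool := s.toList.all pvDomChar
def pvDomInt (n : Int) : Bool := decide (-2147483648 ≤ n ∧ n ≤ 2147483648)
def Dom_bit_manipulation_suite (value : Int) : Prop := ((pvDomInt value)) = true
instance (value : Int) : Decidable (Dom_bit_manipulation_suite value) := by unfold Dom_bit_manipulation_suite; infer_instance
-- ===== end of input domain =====

-- B replaces A's Kernighan clear-lowest-set-bit popcount loop and its separate
-- per-bit reversal loop by one table-driven pass over the nibbles of the word,
-- with per-nibble popcount/bit-reversal lookup tables (objective: alternative).

-- ===== PORT A =====
-- A's `while tmp > 0: tmp &= tmp-1; pop += 1` (Kernighan loop)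
def pvKernLoop (pop tmp : Int) : Int :=
  if 0 < tmp then pvKernLoop (pop + 1) (PySem.Int.band tmp (tmp - 1)) else pop
termination_by tmp.toNat
decreasing_by
  rename_i h
  rw [PySem.Int.band_of_nonneg (by omega) (by omega)]
  have hle : tmp.toNat &&& (tmp - 1).toNat ≤ (tmp - 1).toNat := Nat.and_le_right
  simp only [Int.toNat_natCast]
  omega

-- A's `for i in range(32): rev = (rev << 1) | (tmp2 & 1); tmp2 >>= 1`
def pvRevLoop : Nat → Int → Int → Int
  | 0, rev, _ => rev
  | k + 1, rev, tmp2 =>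
      pvRevLoop k (PySem.Int.bor (rev <<< (1:Nat)) (PySem.Int.band tmp2 1)) (tmp2 >>> (1:Nat))

def bit_manipulation_suite (value : Int) : Int × Int × Int × Int :=
  let v : Int := PySem.Int.band value 0xFFFFFFFF
  let pop : Int := pvKernLoop 0 v
  let rev : Int := pvRevLoop 32 0 v
  let rev : Int := PySem.Int.band rev 0xFFFFFFFF
  let b0 : Int := PySem.Int.band (v >>> (24:Nat)) 0xFF
  let b1 : Int := PySem.Int.band (v >>> (16:Nat)) 0xFF
  let b2 : Int := PySem.Int.band (v >>> (8:Nat)) 0xFF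
  let b3 : Int := PySem.Int.band v 0xFF
  let swapped : Int :=
    PySem.Int.bor (PySem.Int.bor (PySem.Int.bor (b3 <<< (24:Nat)) (b2 <<< (16:Nat))) (b1 <<< (8:Nat))) b0
  let rotated : Int := PySem.Int.band (PySem.Int.bor (v >>> (7:Nat)) (v <<< (25:Nat))) 0xFFFFFFFF
  (pop, rev, swapped, rotated)

-- ===== PORT B =====
-- B's module-level lookup tables: popcount and bit-reversal of a nibble
def pvPOP4 : List Int := [0, 1, 1, 2, 1, 2, 2, 3, 1, 2, 2, 3, 2, 3, 3, 4]
def pvREV4 : List Int := [0, 8, 4, 12, 2, 10, 6, 14, 1, 9, 5, 13, 3, 11, 7, 15]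

-- Python list indexing tbl[nib]; the index is always in range here (nib = tmp & 0xF
-- with tmp ≥ 0), so the .getD 0 default is unreachable
def pvTbl (tbl : List Int) (i : Int) : Int := (PySem.List.pyGet? tbl i).getD 0

-- B's `for _ in range(8): nib = tmp & 0xF; pop += POP4[nib]; rev = (rev << 4) | REV4[nib]; tmp >>= 4`
def pvNibLoop : Nat → Int → Int → Int → Int × Int
  | 0, pop, rev, _ => (pop, rev)
  | k + 1, pop, rev, tmp =>
      let nib : Int := PySem.Int.band tmp 0xF
      pvNibLoop k (pop + pvTbl pvPOP4 nib)
        (PySem.Int.bor (rev <<< (4:Nat)) (pvTbl pvREV4 nib)) (tmp >>> (4:Nat))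

def bit_manipulation_suite_alt (value : Int) : Int × Int × Int × Int :=
  let v : Int := PySem.Int.band value 0xFFFFFFFF
  let pr : Int × Int := pvNibLoop 8 0 0 v
  let b0 : Int := PySem.Int.band (v >>> (24:Nat)) 0xFF
  let b1 : Int := PySem.Int.band (v >>> (16:Nat)) 0xFF
  let b2 : Int := PySem.Int.band (v >>> (8:Nat)) 0xFF
  let b3 : Int := PySem.Int.band v 0xFF
  let swapped : Int :=
    PySem.Int.bor (PySem.Int.bor (PySem.Int.bor (b3 <<< (24:Nat)) (b2 <<< (16:Nat))) (b1 <<< (8:Nat))) b0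
  let rotated : Int := PySem.Int.band (PySem.Int.bor (v >>> (7:Nat)) (v <<< (25:Nat))) 0xFFFFFFFF
  (pr.1, pr.2, swapped, rotated)

-- ===== PRECONDITION & SPEC =====
def Spec_bit_manipulation_suite (value : Int) (out : Int × Int × Int × Int) : Prop := out = bit_manipulation_suite_alt value
instance (value : Int) (out : Int × Int × Int × Int) : Decidable (Spec_bit_manipulation_suite value out) := by unfold Spec_bit_manipulation_suite; infer_instance

-- ===== CLAIM (what is proved, stated in full; the proofs are below) =====
def Claim_equal_bit_manipulation_suite : Prop := ∀ (value : Int), Dom_bit_manipulation_suite value → Spec_bit_manipulation_suite value (bit_manipulation_suite value)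

-- ===== LEMMAS AND PROOFS =====

-- mathematical popcount by halving
def pvPopc (m : Nat) : Nat :=
  if 0 < m then m % 2 + pvPopc (m / 2) else 0
termination_by m
decreasing_by omega

-- mathematical k-bit reversal of the low k bits
def pvBitrev : Nat → Nat → Nat
  | 0, _ => 0
  | k + 1, m => m % 2 * 2 ^ k + pvBitrev k (m / 2)

theorem pvPopc_zero : pvPopc 0 = 0 := by unfold pvPopc; simp

theorem pvPopc_step (n : Nat) : pvPopc n = n % 2 + pvPopc (n / 2) := by
  rcases Nat.eq_zero_or_pos n with h | h
  · subst h; simp [pvPopc_zero]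
  · rw [pvPopc, if_pos h]

theorem pvPopc_two_mul (j : Nat) : pvPopc (2 * j) = pvPopc j := by
  rw [pvPopc_step (2 * j)]
  have h1 : 2 * j % 2 = 0 := by omega
  have h2 : 2 * j / 2 = j := by omega
  rw [h1, h2, Nat.zero_add]

theorem pvPopc_two_mul_add_one (j : Nat) : pvPopc (2 * j + 1) = pvPopc j + 1 := by
  have h1 : (2 * j + 1) % 2 = 1 := by omega
  have h2 : (2 * j + 1) / 2 = j := by omega
  rw [pvPopc_step, h1, h2, Nat.add_comm]

-- Kernighan-step identities on Nat bits
theorem pv_and_odd (j : Nat) : (2 * j + 1) &&& (2 * j) = 2 * j := by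
  apply Nat.eq_of_testBit_eq
  intro i
  cases i with
  | zero =>
    have e1 : (2 * j + 1) % 2 = 1 := by omega
    have e2 : (2 * j) % 2 = 0 := by omega
    simp [Nat.testBit_zero, e1, e2]
  | succ n =>
    have h1 : (2 * j + 1) / 2 = j := by omega
    have h2 : (2 * j) / 2 = j := by omega
    rw [Nat.testBit_and, Nat.testBit_add_one, Nat.testBit_add_one, h1, h2, Bool.and_self]

theorem pv_and_even (j : Nat) (hj : 0 < j) :
    (2 * j) &&& (2 * j - 1) = 2 * (j &&& (j - 1)) := by
  apply Nat.eq_of_testBit_eq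
  intro i
  cases i with
  | zero =>
    have e1 : (2 * j) % 2 = 0 := by omega
    have e2 : (2 * (j &&& (j - 1))) % 2 = 0 := by omega
    simp [Nat.testBit_zero, e1, e2]
  | succ n =>
    have h1 : (2 * j) / 2 = j := by omega
    have h2 : (2 * j - 1) / 2 = j - 1 := by omega
    have h3 : (2 * (j &&& (j - 1))) / 2 = j &&& (j - 1) := by omega
    rw [Nat.testBit_and, Nat.testBit_add_one, Nat.testBit_add_one, Nat.testBit_add_one, h1, h2, h3,
      Nat.testBit_and]

-- clearing the lowest set bit removes exactly one 1-bit
theorem pvPopc_kern_step : ∀ m : Nat, 0 < m → pvPopc (m &&& (m - 1)) + 1 = pvPopc m := by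
  intro m
  induction m using Nat.strong_induction_on with
  | _ m ih =>
    intro hm
    rcases Nat.even_or_odd m with ⟨j, hj⟩ | ⟨j, hj⟩
    · have hj2 : m = 2 * j := by omega
      have hjpos : 0 < j := by omega
      subst hj2
      rw [pv_and_even j hjpos, pvPopc_two_mul, pvPopc_two_mul]
      exact ih j (by omega) hjpos
    · subst hj
      rw [show (2 * j + 1) - 1 = 2 * j by omega, pv_and_odd, pvPopc_two_mul,
        pvPopc_two_mul_add_one]

-- A's Kernighan loop computes pop + popcount
theorem pvKernLoop_eq (n : Nat) : ∀ pop : Int, pvKernLoop pop (↑n) = pop + ↑(pvPopc n) := by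
  induction n using Nat.strong_induction_on with
  | _ n ih =>
    intro pop
    rw [pvKernLoop]
    rcases Nat.eq_zero_or_pos n with h | h
    · subst h; simp [pvPopc_zero]
    · have hpos : (0 : Int) < ↑n := by exact_mod_cast h
      rw [if_pos hpos]
      have hc : (↑n - 1 : Int) = ↑(n - 1) := by omega
      rw [hc, PySem.Int.band_natCast]
      have hlt : n &&& (n - 1) < n := by
        have := Nat.and_le_right (n := n) (m := n - 1); omega
      rw [ih _ hlt]
      have := pvPopc_kern_step n h
      omega

-- popcount splits at any power-of-two boundary
theorem pvPopc_split (j : Nat) : ∀ n : Nat, pvPopc n = pvPopc (n % 2 ^ j) + pvPopc (n / 2 ^ j) := by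
  induction j with
  | zero => intro n; simp [Nat.mod_one, pvPopc_zero]
  | succ j ih =>
    intro n
    have e1 : n % 2 ^ (j + 1) % 2 = n % 2 := by
      have : (2 : Nat) ∣ 2 ^ (j + 1) := dvd_pow_self 2 (by omega)
      exact Nat.mod_mod_of_dvd n this
    have e2 : n % 2 ^ (j + 1) / 2 = n / 2 % 2 ^ j := by
      have := Nat.mod_mul_right_div_self n 2 (2 ^ j)
      rw [show 2 * 2 ^ j = 2 ^ (j + 1) by ring] at this
      exact this
    have e3 : n / 2 ^ (j + 1) = n / 2 / 2 ^ j := by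
      rw [Nat.div_div_eq_div_mul, show 2 * 2 ^ j = 2 ^ (j + 1) by ring]
    rw [pvPopc_step n, pvPopc_step (n % 2 ^ (j + 1)), e1, e2, e3, ih (n / 2)]
    omega

-- or of disjoint parts is addition
theorem pv_or_lo (j r s : Nat) (hs : s < 2 ^ j) : (r * 2 ^ j) ||| s = r * 2 ^ j + s := by
  apply Nat.eq_of_testBit_eq
  intro i
  rw [Nat.testBit_or, show r * 2 ^ j + s = 2 ^ j * r + s by ring,
    Nat.testBit_two_pow_mul_add r hs i, Nat.testBit_mul_two_pow]
  rcases Nat.lt_or_ge i j with hij | hij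
  · simp [hij, Nat.not_le_of_lt hij]
  · have hs' : s.testBit i = false := by
      apply Nat.testBit_eq_false_of_lt
      exact lt_of_lt_of_le hs (Nat.pow_le_pow_right (by omega) hij)
    simp [hij, Nat.not_lt_of_le hij, hs']

theorem pvBitrev_lt (k : Nat) : ∀ m : Nat, pvBitrev k m < 2 ^ k := by
  induction k with
  | zero => intro m; simp [pvBitrev]
  | succ k ih =>
    intro m
    have := ih (m / 2)
    have hm : m % 2 ≤ 1 := by omega
    have : pvBitrev (k + 1) m = m % 2 * 2 ^ k + pvBitrev k (m / 2) := rfl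
    rw [this, pow_succ]
    nlinarith [ih (m / 2)]

theorem pvBitrev_mod (k : Nat) : ∀ m : Nat, pvBitrev k (m % 2 ^ k) = pvBitrev k m := by
  induction k with
  | zero => intro m; rfl
  | succ k ih =>
    intro m
    have e1 : m % 2 ^ (k + 1) % 2 = m % 2 := by
      exact Nat.mod_mod_of_dvd m (dvd_pow_self 2 (by omega))
    have e2 : m % 2 ^ (k + 1) / 2 = m / 2 % 2 ^ k := by
      have := Nat.mod_mul_right_div_self m 2 (2 ^ k)
      rw [show 2 * 2 ^ k = 2 ^ (k + 1) by ring] at this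
      exact this
    show m % 2 ^ (k + 1) % 2 * 2 ^ k + pvBitrev k (m % 2 ^ (k + 1) / 2) = _
    rw [e1, e2, ih (m / 2)]
    rfl

-- reversal splits: low j bits land on top of the reversal of the rest
theorem pvBitrev_add (j k : Nat) : ∀ m : Nat,
    pvBitrev (j + k) m = pvBitrev j m * 2 ^ k + pvBitrev k (m / 2 ^ j) := by
  induction j with
  | zero => intro m; simp [pvBitrev]
  | succ j ih =>
    intro m
    have h1 : j + 1 + k = (j + k) + 1 := by omega
    rw [h1]
    show m % 2 * 2 ^ (j + k) + pvBitrev (j + k) (m / 2) = _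
    rw [ih (m / 2)]
    show _ = (m % 2 * 2 ^ j + pvBitrev j (m / 2)) * 2 ^ k + pvBitrev k (m / 2 ^ (j + 1))
    have e3 : m / 2 ^ (j + 1) = m / 2 / 2 ^ j := by
      rw [Nat.div_div_eq_div_mul, show 2 * 2 ^ j = 2 ^ (j + 1) by ring]
    rw [e3, pow_add]
    ring

-- table lookups agree with the mathematical functions on a nibble
-- popcount of a nibble, written out bit by bit
theorem pvPopc_lt16 (m : Nat) (h : m < 16) :
    pvPopc m = m % 2 + m / 2 % 2 + m / 4 % 2 + m / 8 % 2 := by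
  rw [pvPopc_step m, pvPopc_step (m / 2), pvPopc_step (m / 2 / 2), pvPopc_step (m / 2 / 2 / 2)]
  have h0 : m / 2 / 2 / 2 / 2 = 0 := by omega
  rw [h0, pvPopc_zero]
  omega

set_option maxRecDepth 4096 in
theorem pvTbl_POP4 (m : Nat) (hm : m < 16) : pvTbl pvPOP4 (↑m) = ↑(pvPopc m) := by
  interval_cases m <;> rw [pvPopc_lt16 _ (by omega)] <;>
    norm_num [pvTbl, pvPOP4, PySem.List.pyGet?, PySem.List.pyIdx?] <;> rfl

set_option maxRecDepth 4096 in
theorem pvTbl_REV4 (m : Nat) (hm : m < 16) : pvTbl pvREV4 (↑m) = ↑(pvBitrev 4 m) := by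
  interval_cases m <;>
    norm_num [pvTbl, pvREV4, PySem.List.pyGet?, PySem.List.pyIdx?, pvBitrev] <;> rfl

-- A's reversal loop in closed form
theorem pvRevLoop_eq (k : Nat) : ∀ (r t : Nat),
    pvRevLoop k (↑r) (↑t) = ↑(r * 2 ^ k + pvBitrev k t) := by
  induction k with
  | zero => intro r t; simp [pvRevLoop]
  | succ k ih =>
    intro r t
    rw [pvRevLoop]
    have hsl : ((r : Int) <<< (1:Nat)) = ((r <<< 1 : Nat) : Int) := by norm_cast
    have hsr : ((t : Int) >>> (1:Nat)) = ((t >>> 1 : Nat) : Int) := by norm_cast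
    rw [hsl, show ((1:Int)) = ((1:Nat):Int) by norm_num, PySem.Int.band_natCast,
      PySem.Int.bor_natCast, hsr, ih]
    have h1 : t &&& 1 = t % 2 := Nat.and_one_is_mod t
    have h2 : r <<< 1 = r * 2 := by have := Nat.shiftLeft_eq r 1; omega
    have h3 : t >>> 1 = t / 2 := Nat.shiftRight_one t
    have h4 : (r <<< 1) ||| (t &&& 1) = r * 2 + t % 2 := by
      rw [h1, h2]
      exact pv_or_lo 1 r (t % 2) (by omega)
    rw [h4, h3]
    congr 1
    show (r * 2 + t % 2) * 2 ^ k + pvBitrev k (t / 2) = r * 2 ^ (k + 1) + pvBitrev (k + 1) t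
    show _ = r * 2 ^ (k + 1) + (t % 2 * 2 ^ k + pvBitrev k (t / 2))
    rw [pow_succ]
    ring

-- B's nibble loop in closed form
theorem pvNibLoop_eq (k : Nat) : ∀ (pop : Int) (rev t : Nat),
    pvNibLoop k pop (↑rev) (↑t) =
      (pop + ↑(pvPopc (t % 2 ^ (4 * k))), ↑(rev * 2 ^ (4 * k) + pvBitrev (4 * k) t)) := by
  induction k with
  | zero => intro pop rev t; simp [pvNibLoop, pvBitrev, Nat.mod_one, pvPopc_zero]
  | succ k ih =>
    intro pop rev t
    rw [pvNibLoop]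
    have hb : PySem.Int.band (↑t) 0xF = ((t &&& 15 : Nat) : Int) := by
      rw [show ((0xF : Int)) = ((15:Nat):Int) by norm_num, PySem.Int.band_natCast]
    have hmod : t &&& 15 = t % 16 := by
      have := Nat.and_two_pow_sub_one_eq_mod t 4
      norm_num at this
      exact this
    have hsr : ((t : Int) >>> (4:Nat)) = ((t >>> 4 : Nat) : Int) := by norm_cast
    have hdiv : t >>> 4 = t / 16 := by
      have := Nat.shiftRight_eq_div_pow t 4; omega
    rw [hb, hmod, hsr, hdiv,
      pvTbl_POP4 (t % 16) (by omega), pvTbl_REV4 (t % 16) (by omega)]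
    have hsl : ((rev : Int) <<< (4:Nat)) = ((rev <<< 4 : Nat) : Int) := by norm_cast
    have hbor : PySem.Int.bor ((rev : Int) <<< (4:Nat)) (↑(pvBitrev 4 (t % 16)))
        = ((rev * 16 + pvBitrev 4 (t % 16) : Nat) : Int) := by
      rw [hsl, PySem.Int.bor_natCast]
      congr 1
      have h16 : pvBitrev 4 (t % 16) < 2 ^ 4 := pvBitrev_lt 4 (t % 16)
      have hor := pv_or_lo 4 rev (pvBitrev 4 (t % 16)) h16
      have hsh := Nat.shiftLeft_eq rev 4
      rw [hsh, hor]
      norm_num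
    rw [hbor, ih]
    have hrev4 : pvBitrev 4 (t % 16) = pvBitrev 4 t := by
      have := pvBitrev_mod 4 t; norm_num at this ⊢; exact this
    refine Prod.ext ?_ ?_
    · -- pop components
      have hsplit : pvPopc (t % 2 ^ (4 * (k + 1))) = pvPopc (t % 16) + pvPopc (t / 16 % 2 ^ (4 * k)) := by
        have e1 : t % 2 ^ (4 * (k + 1)) % 16 = t % 16 := by
          apply Nat.mod_mod_of_dvd
          have : (16 : Nat) = 2 ^ 4 := by norm_num
          rw [this]
          exact pow_dvd_pow 2 (by omega)
        have e2 : t % 2 ^ (4 * (k + 1)) / 16 = t / 16 % 2 ^ (4 * k) := by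
          have := Nat.mod_mul_right_div_self t 16 (2 ^ (4 * k))
          rw [show (16 : Nat) * 2 ^ (4 * k) = 2 ^ (4 * (k + 1)) by rw [show 4 * (k+1) = 4 + 4*k by ring, pow_add]; norm_num] at this
          exact this
        have := pvPopc_split 4 (t % 2 ^ (4 * (k + 1)))
        norm_num at this
        rw [this, e1, e2]
      rw [hsplit]
      push_cast
      ring
    · -- rev components
      have hsplit : pvBitrev (4 * (k + 1)) t = pvBitrev 4 t * 2 ^ (4 * k) + pvBitrev (4 * k) (t / 16) := by
        have := pvBitrev_add 4 (4 * k) t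
        rw [show 4 + 4 * k = 4 * (k + 1) by ring] at this
        norm_num at this
        exact this
      rw [hsplit, ← hrev4]
      push_cast
      rw [show (4 * (k + 1)) = 4 + 4 * k by ring, pow_add]
      push_cast
      ring

-- masking with 0xFFFFFFFF yields a natural number below 2^32
set_option maxRecDepth 8192 in
theorem pv_band_mask (a : Int) :
    ∃ n : Nat, PySem.Int.band a 0xFFFFFFFF = ↑n ∧ n < 2 ^ 32 := by
  unfold PySem.Int.band
  have hm : ((0xFFFFFFFF : Int)).toNat = 4294967295 := by decide
  split_ifs with h1 h2 h3
  · refine ⟨a.toNat &&& (0xFFFFFFFF : Int).toNat, rfl, ?_⟩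
    have := Nat.and_le_right (n := a.toNat) (m := (0xFFFFFFFF : Int).toNat)
    omega
  · exact absurd (by omega : (0 : Int) ≤ 0xFFFFFFFF) h2
  · refine ⟨(0xFFFFFFFF : Int).toNat - ((0xFFFFFFFF : Int).toNat &&& (-a - 1).toNat), rfl, by omega⟩
  · exact absurd (by omega : (0 : Int) ≤ 0xFFFFFFFF) h3

-- a natural below 2^32 is unchanged by the 0xFFFFFFFF mask
set_option maxRecDepth 8192 in
theorem pv_mask_id (s : Nat) (hs : s < 2 ^ 32) :
    PySem.Int.band (↑s) 0xFFFFFFFF = ↑s := by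
  have h1 : (0xFFFFFFFF : Int) = ((4294967295 : Nat) : Int) := by decide
  rw [h1, PySem.Int.band_natCast]
  have : s &&& 4294967295 = s % 2 ^ 32 := by
    have := Nat.and_two_pow_sub_one_eq_mod s 32
    norm_num at this ⊢
    exact this
  rw [this, Nat.mod_eq_of_lt hs]

-- ===== VERDICT (by name: the statement is the Claim_ definition above) =====
set_option maxRecDepth 8192 in
theorem bit_manipulation_suite_spec : Claim_equal_bit_manipulation_suite := by
  unfold Claim_equal_bit_manipulation_suite
  intro value _
  unfold Spec_bit_manipulation_suite
  unfold bit_manipulation_suite bit_manipulation_suite_alt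
  obtain ⟨n, hv, hn⟩ := pv_band_mask value
  rw [hv]
  refine Prod.ext ?_ (Prod.ext ?_ rfl)
  · show pvKernLoop 0 (↑n) = (pvNibLoop 8 0 0 (↑n)).1
    have h := pvNibLoop_eq 8 0 0 n
    rw [Nat.cast_zero] at h
    rw [pvKernLoop_eq n 0, h]
    have hmod : n % 2 ^ (4 * 8) = n := by
      have h32 := hn; norm_num at h32 ⊢; omega
    rw [hmod]
  · show PySem.Int.band (pvRevLoop 32 0 (↑n)) 0xFFFFFFFF = (pvNibLoop 8 0 0 (↑n)).2
    have h := pvNibLoop_eq 8 0 0 n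
    rw [Nat.cast_zero] at h
    have hr := pvRevLoop_eq 32 0 n
    rw [Nat.cast_zero] at hr
    rw [hr, h]
    have hlt : 0 * 2 ^ 32 + pvBitrev 32 n < 2 ^ 32 := by
      have := pvBitrev_lt 32 n; omega
    rw [pv_mask_id _ hlt]
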